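-- pv_equiv track=rewrite | github.com/moonie0201/nichproject | auto_publisher/market_wrap.py | _compute_breadth
-- ===== SOURCE A (Python) =====
-- def _compute_breadth(snapshot: dict) -> dict:
--     """섹터·Mag7 어드밴스/디클라인 폭(breadth) 집계."""
--     sectors = snapshot.get("sectors") or []
--     pos_sec = sum(1 for s in sectors if s.get("pct", 0) > 0)
--     neg_sec = sum(1 for s in sectors if s.get("pct", 0) < 0)
--     mag7 = snapshot.get("mag7") or []
--     pos_m7 = sum(1 for m in mag7 if m.get("price", 0) > 0 and m.get("pct", 0) > 0)
--     neg_m7 = sum(1 for m in mag7 if m.get("price", 0) > 0 and m.get("pct", 0) < 0)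
--     return {
--         "sector_positive": pos_sec,
--         "sector_negative": neg_sec,
--         "sector_total": len(sectors),
--         "mag7_positive": pos_m7,
--         "mag7_negative": neg_m7,
--         "mag7_total": sum(1 for m in mag7 if m.get("price", 0) > 0),
--     }
-- ===== SOURCE B (Python) =====
-- def _sign_hist(pcts):
--     """Histogram of sign(pct) in {-1, 0, 1}, built in one pass."""
--     h = {}
--     for p in pcts:
--         k = (p > 0) - (p < 0)
--         h[k] = h.get(k, 0) + 1
--     return h
--
--
-- def _compute_breadth(snapshot: dict) -> dict:
--     """Breadth via sign histograms: tally sign buckets once, read every count off them."""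
--     sectors = snapshot.get("sectors") or []
--     mag7 = snapshot.get("mag7") or []
--     hs = _sign_hist(s.get("pct", 0) for s in sectors)
--     hm = _sign_hist(m.get("pct", 0) for m in mag7 if m.get("price", 0) > 0)
--     return {
--         "sector_positive": hs.get(1, 0),
--         "sector_negative": hs.get(-1, 0),
--         "sector_total": hs.get(-1, 0) + hs.get(0, 0) + hs.get(1, 0),
--         "mag7_positive": hm.get(1, 0),
--         "mag7_negative": hm.get(-1, 0),
--         "mag7_total": hm.get(-1, 0) + hm.get(0, 0) + hm.get(1, 0),
--     }
-- ===== Notes on version B (the rewrite author's own statement) =====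
-- stated objective: alternative
-- what changed: Replaces A's five independent predicate scans with a sign-histogram: each list is reduced once into a dict counting sign(pct) buckets (mag7 gated by price>0), and all six outputs, including both totals, are read off the two histograms as bucket lookups/sums.
import Mathlib
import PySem

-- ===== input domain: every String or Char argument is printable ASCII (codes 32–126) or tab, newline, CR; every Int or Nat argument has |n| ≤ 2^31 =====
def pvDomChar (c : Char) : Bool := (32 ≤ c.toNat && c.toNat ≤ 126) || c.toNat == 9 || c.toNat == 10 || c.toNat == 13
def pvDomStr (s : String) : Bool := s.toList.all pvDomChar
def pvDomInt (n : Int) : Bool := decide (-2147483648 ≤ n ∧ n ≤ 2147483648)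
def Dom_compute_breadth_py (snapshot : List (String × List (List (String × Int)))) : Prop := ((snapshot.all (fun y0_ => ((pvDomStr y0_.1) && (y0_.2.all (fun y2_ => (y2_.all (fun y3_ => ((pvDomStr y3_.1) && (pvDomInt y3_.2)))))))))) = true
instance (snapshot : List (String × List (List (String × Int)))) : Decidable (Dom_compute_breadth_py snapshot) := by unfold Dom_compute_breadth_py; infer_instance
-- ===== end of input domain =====

-- B replaces A's five predicate scans with sign-histogram dicts built once per list; all six outputs are bucket lookups/sums.

-- ===== PORT A =====
-- snapshot.get(k) or []  (the 'or' maps None and [] both to [])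
def pvGetList (d : List (String × List (List (String × Int)))) (k : String) : List (List (String × Int)) :=
  (PySem.Dict.mk d).getD k []

-- m.get(k, 0)
def pvGet0 (m : List (String × Int)) (k : String) : Int :=
  (PySem.Dict.mk m).getD k 0

def compute_breadth_py (snapshot : List (String × List (List (String × Int)))) : List (String × Int) :=
  let sectors := pvGetList snapshot "sectors"
  let pos_sec : Int := sectors.countP (fun s => decide (pvGet0 s "pct" > 0))
  let neg_sec : Int := sectors.countP (fun s => decide (pvGet0 s "pct" < 0))
  let mag7 := pvGetList snapshot "mag7"
  let pos_m7 : Int := mag7.countP (fun m => decide (pvGet0 m "price" > 0) && decide (pvGet0 m "pct" > 0))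
  let neg_m7 : Int := mag7.countP (fun m => decide (pvGet0 m "price" > 0) && decide (pvGet0 m "pct" < 0))
  [("sector_positive", pos_sec),
   ("sector_negative", neg_sec),
   ("sector_total", (sectors.length : Int)),
   ("mag7_positive", pos_m7),
   ("mag7_negative", neg_m7),
   ("mag7_total", (mag7.countP (fun m => decide (pvGet0 m "price" > 0)) : Int))]

-- ===== PORT B =====
-- k = (p > 0) - (p < 0)
def pvSgn (p : Int) : Int := (if p > 0 then (1:Int) else 0) - (if p < 0 then (1:Int) else 0)

-- _sign_hist: one-pass sign histogram  h[k] = h.get(k, 0) + 1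
def pvSignHist (pcts : List Int) : PySem.Dict Int Int :=
  pcts.foldl (fun h p => h.insert (pvSgn p) (h.getD (pvSgn p) 0 + 1)) PySem.Dict.empty

def compute_breadth_py_alt (snapshot : List (String × List (List (String × Int)))) : List (String × Int) :=
  let sectors := pvGetList snapshot "sectors"
  let mag7 := pvGetList snapshot "mag7"
  let hs := pvSignHist (sectors.map (fun s => pvGet0 s "pct"))
  let hm := pvSignHist ((mag7.filter (fun m => decide (pvGet0 m "price" > 0))).map (fun m => pvGet0 m "pct"))
  [("sector_positive", hs.getD 1 0),
   ("sector_negative", hs.getD (-1) 0),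
   ("sector_total", hs.getD (-1) 0 + hs.getD 0 0 + hs.getD 1 0),
   ("mag7_positive", hm.getD 1 0),
   ("mag7_negative", hm.getD (-1) 0),
   ("mag7_total", hm.getD (-1) 0 + hm.getD 0 0 + hm.getD 1 0)]

-- ===== PRECONDITION & SPEC =====
def Spec_compute_breadth_py (snapshot : List (String × List (List (String × Int)))) (out : List (String × Int)) : Prop := out = compute_breadth_py_alt snapshot
instance (snapshot : List (String × List (List (String × Int)))) (out : List (String × Int)) : Decidable (Spec_compute_breadth_py snapshot out) := by unfold Spec_compute_breadth_py; infer_instance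

-- ===== CLAIM =====
def Claim_equal_compute_breadth_py : Prop := ∀ (snapshot : List (String × List (List (String × Int)))), Dom_compute_breadth_py snapshot → Spec_compute_breadth_py snapshot (compute_breadth_py snapshot)

-- ===== LEMMAS AND PROOFS =====

-- the histogram bucket k holds the number of elements of sign k (loop invariant over the fold)
theorem signHist_fold (l : List Int) (k : Int) (d : PySem.Dict Int Int) :
    (l.foldl (fun h p => h.insert (pvSgn p) (h.getD (pvSgn p) 0 + 1)) d).getD k 0
    = d.getD k 0 + (l.countP (fun p => pvSgn p == k) : Int) := by
  induction l generalizing d with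
  | nil => simp
  | cons x xs ih =>
    simp only [List.foldl_cons, List.countP_cons, ih]
    rw [PySem.Dict.getD_insert]
    by_cases h : k = pvSgn x
    · simp [h]; omega
    · have : ¬ (pvSgn x == k) := by simpa using (Ne.symm h)
      simp [h, this]

theorem signHist_getD (l : List Int) (k : Int) :
    (pvSignHist l).getD k 0 = (l.countP (fun p => pvSgn p == k) : Int) := by
  unfold pvSignHist
  rw [signHist_fold]
  simp

theorem sgn_eq_one (p : Int) : (pvSgn p == 1) = decide (p > 0) := by
  unfold pvSgn; split_ifs <;> simp <;> omega

theorem sgn_eq_neg_one (p : Int) : (pvSgn p == -1) = decide (p < 0) := by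
  unfold pvSgn; split_ifs <;> simp <;> omega

-- the three sign buckets partition the list
theorem sign_partition (l : List Int) :
    l.countP (fun p => pvSgn p == -1) + l.countP (fun p => pvSgn p == 0)
      + l.countP (fun p => pvSgn p == 1) = l.length := by
  induction l with
  | nil => simp
  | cons x xs ih =>
    simp only [List.countP_cons, List.length_cons]
    have h : pvSgn x = -1 ∨ pvSgn x = 0 ∨ pvSgn x = 1 := by unfold pvSgn; split_ifs <;> omega
    rcases h with h | h | h <;> simp [h] <;> omega

-- countP over a filter is a conjunctive countP over the whole list
theorem countP_filter_map (mag7 : List (List (String × Int))) (q : Int → Bool) :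
    ((mag7.filter (fun m => decide (pvGet0 m "price" > 0))).map (fun m => pvGet0 m "pct")).countP q
      = mag7.countP (fun m => decide (pvGet0 m "price" > 0) && q (pvGet0 m "pct")) := by
  rw [List.countP_map, List.countP_filter]
  apply List.countP_congr
  intro m _
  simp [Bool.and_comm]

-- ===== VERDICT =====
theorem compute_breadth_py_spec : Claim_equal_compute_breadth_py := by
  intro snapshot _
  unfold Spec_compute_breadth_py compute_breadth_py compute_breadth_py_alt
  simp only [signHist_getD]
  have hs := sign_partition ((pvGetList snapshot "sectors").map (fun s => pvGet0 s "pct"))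
  have hm := sign_partition ((((pvGetList snapshot "mag7").filter
      (fun m => decide (pvGet0 m "price" > 0))).map (fun m => pvGet0 m "pct")))
  simp only [countP_filter_map] at *
  simp only [sgn_eq_one, sgn_eq_neg_one] at *
  simp only [List.countP_map, Function.comp_def] at *
  simp only [List.length_map, ← List.countP_eq_length_filter] at *
  simp only [List.cons.injEq, Prod.mk.injEq, and_true, true_and]
  push_cast at *
  omega
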